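-- pv_equiv track=rewrite | github.com/eragasa/mexm-base | src/mexm/io/eamtools/basesetflfile.py | get_symbol_pairs
-- ===== SOURCE A (Python) =====
-- def get_symbol_pairs(symbols):
--     """determine symbol pairs
--
--     given a list of symbols gives a list of symbol pairs in the appropriate order expected within the pypospack package.
--
--     Args:
--         symbols(list of str, str): a list of symbols
--     Returns:
--         (list of list):a list of symbol pairs
--     Exception:
--         (TypeError) if symbols is neither a list nor a string
--
--     """
--
--     if isinstance(symbols, str):
--         symbols_ = [symbols]
--     elif isinstance(symbols, list):
--         symbols_ = symbols
--     else:
--         msg = (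
--             "symbols argument must either be a list of chemical symbols",
--             "or a chemical symbol")
--         raise TypeError(msg)
--
--     symbol_pairs = []
--     for i1,s1 in enumerate(symbols_):
--         for i2,s2 in enumerate(symbols_):
--             if i1 <= i2:
--                 symbol_pairs.append([s1,s2])
--
--     return symbol_pairs
-- ===== SOURCE B (Python) =====
-- def get_symbol_pairs(symbols):
--     """determine symbol pairs (suffix-peeling formulation: no index filter)."""
--     if isinstance(symbols, str):
--         symbols_ = [symbols]
--     elif isinstance(symbols, list):
--         symbols_ = symbols
--     else:
--         msg = (
--             "symbols argument must either be a list of chemical symbols",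
--             "or a chemical symbol")
--         raise TypeError(msg)
--
--     symbol_pairs = []
--     rest = symbols_
--     while rest:
--         s1 = rest[0]
--         symbol_pairs.extend([s1, s2] for s2 in rest)
--         rest = rest[1:]
--     return symbol_pairs
-- ===== Notes on version B (the rewrite author's own statement) =====
-- stated objective: simpler
-- what changed: Replaces the nested enumerate loops with an i1<=i2 index filter by a single suffix-peeling loop that, for each suffix, pairs its head with every element of the suffix, so only the wanted pairs are ever generated and no indices or filter exist.
import Mathlib
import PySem

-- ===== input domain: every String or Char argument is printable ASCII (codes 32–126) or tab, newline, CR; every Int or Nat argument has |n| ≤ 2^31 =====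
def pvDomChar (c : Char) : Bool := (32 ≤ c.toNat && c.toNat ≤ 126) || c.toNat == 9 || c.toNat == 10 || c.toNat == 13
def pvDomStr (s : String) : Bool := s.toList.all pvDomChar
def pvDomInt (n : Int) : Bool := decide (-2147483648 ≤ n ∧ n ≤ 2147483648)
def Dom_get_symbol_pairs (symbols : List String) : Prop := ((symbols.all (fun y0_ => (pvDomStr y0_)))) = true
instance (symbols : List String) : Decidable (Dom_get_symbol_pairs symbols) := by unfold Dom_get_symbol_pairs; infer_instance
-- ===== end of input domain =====

-- B replaces A's nested enumerate loops + 'i1 <= i2' filter by a suffix-peeling loop that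
-- emits only the wanted pairs (objective: simpler). In Lean the argument is a list, so the
-- Python str/TypeError prologue (identical in A and B) has no counterpart here.

-- ===== PORT A =====
-- nested 'for i1,s1 in enumerate' / 'for i2,s2 in enumerate' with append under 'if i1 <= i2'
def get_symbol_pairs (symbols : List String) : List (List String) :=
  (PySem.List.enumerate symbols).foldl (fun symbol_pairs p1 =>
    (PySem.List.enumerate symbols).foldl (fun sp p2 =>
      if p1.1 ≤ p2.1 then sp ++ [[p1.2, p2.2]] else sp) symbol_pairs) []

-- ===== PORT B =====
-- the while-loop over successive suffixes: head paired with every element of the suffix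
def pairsGo : List String → List (List String)
  | [] => []
  | s1 :: rest => (s1 :: rest).map (fun s2 => [s1, s2]) ++ pairsGo rest

def get_symbol_pairs_alt (symbols : List String) : List (List String) :=
  pairsGo symbols

-- ===== PRECONDITION & SPEC =====
def Spec_get_symbol_pairs (symbols : List String) (out : List (List String)) : Prop := out = get_symbol_pairs_alt symbols
instance (symbols : List String) (out : List (List String)) : Decidable (Spec_get_symbol_pairs symbols out) := by unfold Spec_get_symbol_pairs; infer_instance

-- ===== CLAIM (what is proved, stated in full; the proofs are below) =====
def Claim_equal_get_symbol_pairs : Prop := ∀ (symbols : List String), Dom_get_symbol_pairs symbols → Spec_get_symbol_pairs symbols (get_symbol_pairs symbols)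

-- ===== LEMMAS AND PROOFS =====

-- indices produced by enumerate from start u are ≥ u, hence a `s ≤ ·` filter keeps everything (s ≤ u)
theorem enumerate_filter_all (t : List String) (u s : Int) (h : s ≤ u) :
    (PySem.List.enumerate t u).filter (fun q => decide (s ≤ q.1)) = PySem.List.enumerate t u := by
  apply List.filter_eq_self.mpr
  intro q hq
  rcases (PySem.List.mem_enumerate_iff _ _ _).mp hq with ⟨k, hk, rfl⟩
  simpa using by omega

-- A's double loop collapses to a flatMap of filtered maps
theorem portA_flatMap (l : List String) :
    get_symbol_pairs l =
      (PySem.List.enumerate l).flatMap (fun p1 =>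
        ((PySem.List.enumerate l).filter (fun q => decide (p1.1 ≤ q.1))).map
          (fun q => [p1.2, q.2])) := by
  unfold get_symbol_pairs
  rw [show (fun (symbol_pairs : List (List String)) (p1 : Int × String) =>
        (PySem.List.enumerate l).foldl (fun sp p2 =>
          if p1.1 ≤ p2.1 then sp ++ [[p1.2, p2.2]] else sp) symbol_pairs)
      = (fun symbol_pairs (p1 : Int × String) => symbol_pairs ++
          ((PySem.List.enumerate l).filter (fun (q : Int × String) => decide (p1.1 ≤ q.1))).map
            (fun q => [p1.2, q.2])) from ?_]
  · rw [PySem.List.foldl_append_eq_flatMap]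
    simp
  · funext sp p1
    exact PySem.List.foldl_append_ite (p := fun (q : Int × String) => p1.1 ≤ q.1) (f := fun q => [p1.2, q.2]) _ _

-- the flatMap over the full enumeration, started anywhere, is pairsGo
theorem flatMap_eq_pairsGo (l : List String) : ∀ (s : Int),
    (PySem.List.enumerate l s).flatMap (fun p1 =>
      ((PySem.List.enumerate l s).filter (fun q => decide (p1.1 ≤ q.1))).map
        (fun q => [p1.2, q.2])) = pairsGo l := by
  induction l with
  | nil => intro s; rfl
  | cons x t ih =>
    intro s
    rw [PySem.List.enumerate_cons, List.flatMap_cons]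
    have htail : ∀ p1 ∈ PySem.List.enumerate t (s + 1),
        (((s, x) :: PySem.List.enumerate t (s + 1)).filter (fun q => decide (p1.1 ≤ q.1))).map
          (fun q => [p1.2, q.2])
        = ((PySem.List.enumerate t (s + 1)).filter (fun q => decide (p1.1 ≤ q.1))).map
          (fun q => [p1.2, q.2]) := by
      intro p1 hp1
      rcases (PySem.List.mem_enumerate_iff _ _ _).mp hp1 with ⟨k, hk, rfl⟩
      rw [List.filter_cons]
      have hlt : ¬ (s + 1 + (k : Int) ≤ s) := by omega
      simp [hlt]
    rw [List.flatMap_congr htail, ih (s + 1)]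
    rw [List.filter_cons]
    simp only [show (decide (((s : Int), x).1 ≤ ((s : Int), x).1)) = true from by simp]
    rw [enumerate_filter_all t (s + 1) s (by omega)]
    show ([x, x] :: ((PySem.List.enumerate t (s+1)).map (fun q => [x, q.2]))) ++ _ = _
    have : (PySem.List.enumerate t (s+1)).map (fun q => [x, q.2])
        = t.map (fun s2 => [x, s2]) := by
      rw [show (fun (q : Int × String) => [x, q.2]) = (fun s2 => [x, s2]) ∘ (·.2) from rfl,
        ← List.map_map, PySem.List.map_snd_enumerate]
    rw [this]
    rfl

-- ===== VERDICT (by name: the statement is the Claim_ definition above) =====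
theorem get_symbol_pairs_spec : Claim_equal_get_symbol_pairs := by
  intro symbols _
  show get_symbol_pairs symbols = get_symbol_pairs_alt symbols
  rw [portA_flatMap]
  exact flatMap_eq_pairsGo symbols 0
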